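-- pv_equiv track=rewrite | github.com/xanv754/State-Consumption | common/utils/fix.py | fix_ip
-- ===== SOURCE A (Python) =====
-- def fix_ip(ip: int) -> str:
--     """Fixes the deleted points of an IP."""
--     if type(ip) == int:
--         ip_string = str(ip)
--         ip_string_reversed = "".join(reversed(ip_string))
--         i = 0
--         fix_ip = ''
--         for character in ip_string_reversed:
--             if i == 3:
--                 fix_ip = fix_ip + '.' + character
--                 i = 0
--             else: fix_ip = fix_ip + character
--             i += 1
--         fix_ip = "".join(reversed(fix_ip))
--         return fix_ip
--     else: return ip
-- ===== SOURCE B (Python) =====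
-- def fix_ip(ip: int) -> str:
--     """Fixes the deleted points of an IP."""
--     if type(ip) == int:
--         s = str(ip)
--         parts = []
--         while len(s) > 3:
--             parts.append(s[-3:])
--             s = s[:-3]
--         parts.append(s)
--         return '.'.join(reversed(parts))
--     else:
--         return ip
-- ===== Notes on version B (the rewrite author's own statement) =====
-- stated objective: simpler
-- what changed: Replaces A's reverse-string, per-character counter loop and final re-reverse with a loop that peels the last three characters into a parts list and joins the reversed parts with '.'.
import Mathlib
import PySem

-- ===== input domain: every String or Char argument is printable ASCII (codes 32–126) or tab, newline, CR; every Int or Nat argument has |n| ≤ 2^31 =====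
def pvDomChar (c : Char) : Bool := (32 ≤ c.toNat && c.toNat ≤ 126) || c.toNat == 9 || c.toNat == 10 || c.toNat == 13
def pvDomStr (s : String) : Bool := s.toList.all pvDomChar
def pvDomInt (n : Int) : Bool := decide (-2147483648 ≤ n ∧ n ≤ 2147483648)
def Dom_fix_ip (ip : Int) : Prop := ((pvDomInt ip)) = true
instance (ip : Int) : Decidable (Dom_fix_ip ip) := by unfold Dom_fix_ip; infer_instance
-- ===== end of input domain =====

-- B replaces A's reverse / per-character counter loop / reverse with a while loop that
-- peels the last three characters into a parts list and joins with '.'; objective: simpler.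
-- (ip : Int, so Python's `type(ip) == int` guard is always true; only that branch is ported.)

-- ===== PORT A =====
-- the for-loop over the reversed digit string, with counter i and accumulator `fix_ip`
def fixIpLoopA : List Char → Int → List Char → List Char
  | [], _, acc => acc
  | c :: r, i, acc =>
    if i == 3 then fixIpLoopA r (0 + 1) (acc ++ ['.', c])   -- i = 0 then i += 1
    else fixIpLoopA r (i + 1) (acc ++ [c])

def fix_ip (ip : Int) : String :=
  let ip_string := (PySem.Int.toStr ip).toList          -- str(ip), as its code points
  let ip_string_reversed := ip_string.reverse           -- "".join(reversed(ip_string))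
  String.ofList (fixIpLoopA ip_string_reversed 0 []).reverse

-- ===== PORT B =====
-- the while loop of Source B (|s| > 3: parts.append(s[-3:]); s = s[:-3]) plus the final parts.append(s)
def fixIpLoopB (s : List Char) (parts : List (List Char)) : List (List Char) :=
  if s.length > 3 then
    fixIpLoopB (PySem.List.slice s none (some (-3))) (parts ++ [PySem.List.slice s (some (-3)) none])
  else parts ++ [s]
termination_by s.length
decreasing_by
  rw [PySem.List.slice_to_neg_ofNat s 3 (by omega)]
  simp
  omega

def fix_ip_alt (ip : Int) : String :=
  let s := (PySem.Int.toStr ip).toList                  -- str(ip), as its code points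
  String.ofList (PySem.Chars.join ['.'] (fixIpLoopB s []).reverse)   -- '.'.join(reversed(parts))

-- ===== PRECONDITION & SPEC =====
def Spec_fix_ip (ip : Int) (out : String) : Prop := out = fix_ip_alt ip
instance (ip : Int) (out : String) : Decidable (Spec_fix_ip ip out) := by unfold Spec_fix_ip; infer_instance

-- ===== CLAIM (what is proved, stated in full; the proofs are below) =====
def Claim_equal_fix_ip : Prop := ∀ (ip : Int), Dom_fix_ip ip → Spec_fix_ip ip (fix_ip ip)

-- ===== LEMMAS AND PROOFS =====

-- A's loop only ever appends to its accumulator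
theorem fixIpLoopA_acc (r : List Char) : ∀ (i : Int) (acc : List Char),
    fixIpLoopA r i acc = acc ++ fixIpLoopA r i [] := by
  induction r with
  | nil => intro i acc; simp [fixIpLoopA]
  | cons c r ih =>
    intro i acc
    by_cases h : i == 3
    · have h1 := ih (1 : Int) (acc ++ ['.', c])
      have h2 := ih (1 : Int) ['.', c]
      simp [fixIpLoopA, h, h1, h2]
    · have h1 := ih (i+1) (acc ++ [c])
      have h2 := ih (i+1) [c]
      simp [fixIpLoopA, h, h1, h2]

-- after three characters, A's loop emits a dot (when more input remains) and restarts
theorem fixIpLoopA_split (x y : List Char) (hx : x.length = 3) (hy : y ≠ []) :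
    fixIpLoopA (x ++ y) 0 [] = x ++ '.' :: fixIpLoopA y 0 [] := by
  match x, hx with
  | [a, b, c], _ =>
    match y, hy with
    | d :: y', _ =>
      simp [fixIpLoopA, fixIpLoopA_acc y' 1 [a, b, c, '.', d], fixIpLoopA_acc y' 1 [d]]

-- B's loop only ever appends to its parts accumulator
theorem fixIpLoopB_acc (s : List Char) (parts : List (List Char)) :
    fixIpLoopB s parts = parts ++ fixIpLoopB s [] := by
  by_cases h : s.length > 3
  · rw [fixIpLoopB, if_pos h]
    conv_rhs => rw [fixIpLoopB, if_pos h]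
    rw [fixIpLoopB_acc (PySem.List.slice s none (some (-3)))
          (parts ++ [PySem.List.slice s (some (-3)) none]),
        fixIpLoopB_acc (PySem.List.slice s none (some (-3)))
          ([] ++ [PySem.List.slice s (some (-3)) none])]
    simp
  · rw [fixIpLoopB, if_neg h]
    conv_rhs => rw [fixIpLoopB, if_neg h]
    simp
termination_by s.length
decreasing_by
  all_goals
    rw [PySem.List.slice_to_neg_ofNat s 3 (by omega)]
    simp
    omega

theorem fixIpLoopB_ne_nil (s : List Char) (parts : List (List Char)) :
    fixIpLoopB s parts ≠ [] := by
  rw [fixIpLoopB]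
  split
  · exact fixIpLoopB_ne_nil _ _
  · simp
termination_by s.length
decreasing_by
  rw [PySem.List.slice_to_neg_ofNat s 3 (by omega)]
  simp
  omega

-- appending one more part to a nonempty join inserts one separator
theorem join_append_singleton (sep u : List Char) :
    ∀ (X : List (List Char)), X ≠ [] →
    PySem.Chars.join sep (X ++ [u]) = PySem.Chars.join sep X ++ sep ++ u := by
  intro X
  induction X with
  | nil => intro h; exact absurd rfl h
  | cons p X ih =>
    intro _
    cases X with
    | nil => simp [PySem.Chars.join_cons_cons, PySem.Chars.join_singleton]
    | cons q X' =>
      have h2 := ih (by simp)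
      simp only [List.cons_append] at h2 ⊢
      rw [PySem.Chars.join_cons_cons, PySem.Chars.join_cons_cons, h2]
      simp

-- the common core: A's reversed counter loop equals B's peel-three-from-the-right chunking
theorem fix_ip_core (s : List Char) :
    (fixIpLoopA s.reverse 0 []).reverse = PySem.Chars.join ['.'] (fixIpLoopB s []).reverse := by
  by_cases h : s.length > 3
  · -- split s = t ++ u with |u| = 3, t ≠ []
    have hu : (s.drop (s.length - 3)).length = 3 := by simp; omega
    have ht : s.take (s.length - 3) ≠ [] := by
      intro hc
      have := congrArg List.length hc
      simp at this
      omega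
    have hsplit : s = s.take (s.length - 3) ++ s.drop (s.length - 3) := by simp
    have ihA := fix_ip_core (s.take (s.length - 3))
    calc (fixIpLoopA s.reverse 0 []).reverse
        = (fixIpLoopA ((s.drop (s.length - 3)).reverse ++ (s.take (s.length - 3)).reverse)
              0 []).reverse := by
          conv_lhs => rw [hsplit]
          rw [List.reverse_append]
      _ = ((s.drop (s.length - 3)).reverse ++
              '.' :: fixIpLoopA (s.take (s.length - 3)).reverse 0 []).reverse := by
          rw [fixIpLoopA_split _ _ (by simp [hu]) (by simp [ht])]
      _ = (fixIpLoopA (s.take (s.length - 3)).reverse 0 []).reverse ++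
              '.' :: s.drop (s.length - 3) := by
          simp
      _ = PySem.Chars.join ['.'] (fixIpLoopB (s.take (s.length - 3)) []).reverse ++
              '.' :: s.drop (s.length - 3) := by rw [ihA]
      _ = PySem.Chars.join ['.'] (fixIpLoopB s []).reverse := by
          conv_rhs => rw [fixIpLoopB]
          rw [if_pos h,
            PySem.List.slice_to_neg_ofNat s 3 (by omega),
            PySem.List.slice_from_neg_ofNat s 3 (by omega),
            fixIpLoopB_acc _ ([] ++ [List.drop (s.length - 3) s])]
          rw [List.nil_append, List.reverse_append]
          simp only [List.reverse_singleton]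
          rw [join_append_singleton _ _ _ (by simp [fixIpLoopB_ne_nil])]
          simp
  · -- |s| ≤ 3: A's loop copies the characters, B has the single chunk [s]
    rw [fixIpLoopB, if_neg h]
    simp [PySem.Chars.join_singleton]
    have base : ∀ (l : List Char), l.length ≤ 3 → fixIpLoopA l 0 [] = l := by
      intro l hl
      match l, hl with
      | [], _ => simp [fixIpLoopA]
      | [a], _ => simp [fixIpLoopA]
      | [a, b], _ => simp [fixIpLoopA]
      | [a, b, c], _ => simp [fixIpLoopA]
    rw [base s.reverse (by simp; omega)]
    simp
termination_by s.length
decreasing_by simp; omega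

-- ===== VERDICT (by name: the statement is the Claim_ definition above) =====
theorem fix_ip_spec : Claim_equal_fix_ip := by
  intro ip _
  unfold Spec_fix_ip fix_ip fix_ip_alt
  exact congrArg String.ofList (fix_ip_core _)
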